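-- pv_equiv track=rewrite | github.com/marcefanitoli/pyment | pyment/docstring.py | get_doctests_indexes
-- ===== SOURCE A (Python) =====
-- from typing import Optional, Iterator, List, Dict, Tuple, Union
--
-- def get_doctests_indexes(data: str) -> Tuple[int, int]:
--     """Extract Doctests if found and return it.
--
--     Parameters
--     ----------
--     data : str
--         string to parse
--
--     Returns
--     -------
--     Tuple[int,int]
--         index of start and index of end of the doctest, else (-1, -1)
--     """
--     start, end = -1, -1
--     datalst = data.splitlines()
--     for i, line in enumerate(datalst):
--         if start > -1:
--             if line.strip() == "":
--                 break
--             end = i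
--         elif line.strip().startswith(">>>"):
--             start = i
--             end = i
--     return start, end
-- ===== SOURCE B (Python) =====
-- def _find_start(lines):
--     for i, line in enumerate(lines):
--         if line.strip().startswith(">>>"):
--             return i
--     return -1
--
--
-- def get_doctests_indexes(data):
--     """Find start/end line indexes of the first doctest block, else (-1, -1)."""
--     lines = data.splitlines()
--     start = _find_start(lines)
--     if start == -1:
--         return (-1, -1)
--     end = start
--     for i, line in enumerate(lines[start + 1:], start + 1):
--         if line.strip() == "":
--             break
--         end = i
--     return (start, end)
-- ===== Notes on version B (the rewrite author's own statement) =====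
-- stated objective: simpler
-- what changed: Replaces A's single state-machine pass (mode tracked via start>-1 inside one loop) by a locate-then-extend decomposition: one helper scan returns the index of the first doctest-marker line (early return), then a second loop over the slice after it extends the end until a blank line.
import Mathlib
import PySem

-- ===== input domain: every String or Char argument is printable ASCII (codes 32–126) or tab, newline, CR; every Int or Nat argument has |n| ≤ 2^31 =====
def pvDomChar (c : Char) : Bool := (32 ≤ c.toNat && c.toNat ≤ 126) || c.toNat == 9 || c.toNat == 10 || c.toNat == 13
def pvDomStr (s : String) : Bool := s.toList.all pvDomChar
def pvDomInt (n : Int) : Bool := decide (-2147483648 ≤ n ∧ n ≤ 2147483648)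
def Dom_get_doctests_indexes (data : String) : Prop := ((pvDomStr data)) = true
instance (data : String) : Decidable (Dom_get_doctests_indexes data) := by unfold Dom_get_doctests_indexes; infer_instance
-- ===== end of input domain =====

-- B is a locate-then-extend decomposition of A's single state-machine loop; same O(n) cost, return values proved equal.

-- ===== PORT A =====
-- the enumerate loop, carried as structural recursion with the counter i and state (start, end)
def pvGoA : List String → Int → Int → Int → Int × Int
  | [], _, s, e => (s, e)
  | line :: rest, i, s, e =>
    if s > -1 then
      if PySem.Str.strip line = "" then (s, e)
      else pvGoA rest (i + 1) s i
    else if PySem.Str.startswith (PySem.Str.strip line) ">>>" then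
      pvGoA rest (i + 1) i i
    else
      pvGoA rest (i + 1) s e

def get_doctests_indexes (data : String) : Int × Int :=
  pvGoA (PySem.Str.splitlines data) 0 (-1) (-1)

-- ===== PORT B =====
-- first loop of Source B: first index whose stripped line starts with ">>>", else -1
def pvFindStart : List String → Int → Int
  | [], _ => -1
  | line :: rest, i =>
    if PySem.Str.startswith (PySem.Str.strip line) ">>>" then i
    else pvFindStart rest (i + 1)

-- second loop of Source B: extend end over the remaining lines until a blank line
def pvExtend : List String → Int → Int → Int
  | [], _, e => e
  | line :: rest, i, e =>
    if PySem.Str.strip line = "" then e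
    else pvExtend rest (i + 1) i

def get_doctests_indexes_alt (data : String) : Int × Int :=
  let lines := PySem.Str.splitlines data
  let start := pvFindStart lines 0
  if start = -1 then (-1, -1)
  else (start, pvExtend (PySem.List.slice lines (some (start + 1)) none) (start + 1) start)

-- ===== PRECONDITION & SPEC =====
def Spec_get_doctests_indexes (data : String) (out : Int × Int) : Prop := out = get_doctests_indexes_alt data
instance (data : String) (out : Int × Int) : Decidable (Spec_get_doctests_indexes data out) := by unfold Spec_get_doctests_indexes; infer_instance

-- ===== CLAIM (what is proved, stated in full; the proofs are below) =====
def Claim_equal_get_doctests_indexes : Prop := ∀ (data : String), Dom_get_doctests_indexes data → Spec_get_doctests_indexes data (get_doctests_indexes data)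

-- ===== LEMMAS AND PROOFS =====

-- once start is found (s > -1), A's loop just extends the end: it equals pvExtend
lemma pvGoA_started (ls : List String) (i s e : Int) (hs : s > -1) :
    pvGoA ls i s e = (s, pvExtend ls i e) := by
  induction ls generalizing i e with
  | nil => simp [pvGoA, pvExtend]
  | cons l rest ih =>
    simp only [pvGoA, pvExtend, if_pos hs]
    split_ifs with h
    · rfl
    · exact ih (i + 1) i

lemma pvFindStart_ge (ls : List String) (i : Int) :
    pvFindStart ls i = -1 ∨ i ≤ pvFindStart ls i := by
  induction ls generalizing i with
  | nil => exact Or.inl rfl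
  | cons l rest ih =>
    simp only [pvFindStart]
    split_ifs with h
    · exact Or.inr le_rfl
    · rcases ih (i + 1) with h1 | h1
      · exact Or.inl h1
      · exact Or.inr (by omega)

-- main invariant: A's loop from fresh state equals B's locate-then-extend on the same suffix
lemma pvGoA_main (ls : List String) (i : Int) (hi : 0 ≤ i) :
    pvGoA ls i (-1) (-1) =
      (let s := pvFindStart ls i;
       if s = -1 then ((-1 : Int), (-1 : Int))
       else (s, pvExtend (ls.drop (s - i + 1).toNat) (s + 1) s)) := by
  induction ls generalizing i with
  | nil => simp [pvGoA, pvFindStart]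
  | cons l rest ih =>
    by_cases h : PySem.Str.startswith (PySem.Str.strip l) ">>>" = true
    · -- head line starts the doctest
      have hg : pvGoA (l :: rest) i (-1) (-1) = pvGoA rest (i + 1) i i := by
        simp only [pvGoA]
        rw [if_neg (show ¬((-1 : Int) > -1) by omega), if_pos h]
      rw [hg, pvGoA_started rest (i + 1) i i (by omega)]
      have hf : pvFindStart (l :: rest) i = i := by
        simp only [pvFindStart]; rw [if_pos h]
      simp only [hf]
      rw [if_neg (by omega : ¬ i = -1)]
      simp
    · -- keep searching
      have hg : pvGoA (l :: rest) i (-1) (-1) = pvGoA rest (i + 1) (-1) (-1) := by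
        simp only [pvGoA]
        rw [if_neg (show ¬((-1 : Int) > -1) by omega), if_neg h]
      have hf : pvFindStart (l :: rest) i = pvFindStart rest (i + 1) := by
        simp only [pvFindStart]; rw [if_neg h]
      rw [hg, ih (i + 1) (by omega)]
      simp only [hf]
      rcases pvFindStart_ge rest (i + 1) with hfe | hfe
      · simp [hfe]
      · set s := pvFindStart rest (i + 1) with hsdef
        rw [if_neg (by omega : ¬ s = -1), if_neg (by omega : ¬ s = -1)]
        have h1 : (s - i + 1).toNat = (s - (i + 1) + 1).toNat + 1 := by omega
        simp [h1]

theorem pv_main (data : String) :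
    get_doctests_indexes data = get_doctests_indexes_alt data := by
  unfold get_doctests_indexes get_doctests_indexes_alt
  rw [pvGoA_main (PySem.Str.splitlines data) 0 le_rfl]
  set ls := PySem.Str.splitlines data
  simp only
  rcases pvFindStart_ge ls 0 with hf | hf
  · simp [hf]
  · set s := pvFindStart ls 0 with hsdef
    have hne : ¬ s = -1 := by omega
    simp only [if_neg hne]
    rw [PySem.List.slice_from ls (show (0:Int) ≤ s + 1 by omega)]
    have : s - 0 + 1 = s + 1 := by omega
    rw [this]

-- ===== VERDICT (by name: the statement is the Claim_ definition above) =====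
theorem get_doctests_indexes_spec : Claim_equal_get_doctests_indexes := by
  intro data _
  unfold Spec_get_doctests_indexes
  exact pv_main data
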